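-- pv_equiv track=rewrite | github.com/FranciscoFvg/OBI-Python-2021 | CódigosFase01/cifra.py | mudar
-- ===== SOURCE A (Python) =====
-- def mudar(l, pc):
--   replace = str(l)
--
--   listaDV = []
--   posv = 0;
--
--   for i, vogaln in enumerate(von):
--     listaDV.append(abs(con[pc] - vogaln))
--     vvm = min(listaDV)
--     posv = listaDV.index(vvm)
--
--   replace += str(vo[posv])
--
--   replace += str(co[pc + 1])
--
--   return str(replace)
--
-- con = [ 2, 3, 4, 6, 7, 8, 10, 11, 12, 13, 14, 16, 17, 18, 19, 20, 22, 23, 24]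
--
-- co = ['b','c','d','f','g','h','j','k','l','m','n','p','q','r','s','t','v','x','z']
--
-- von = [ 1, 5, 9, 15, 21]
--
-- vo = ['a','e','i','o','u']
-- ===== SOURCE B (Python) =====
-- con = [ 2, 3, 4, 6, 7, 8, 10, 11, 12, 13, 14, 16, 17, 18, 19, 20, 22, 23, 24]
--
-- co = ['b','c','d','f','g','h','j','k','l','m','n','p','q','r','s','t','v','x','z']
--
-- von = [ 1, 5, 9, 15, 21]
--
-- vo = ['a','e','i','o','u']
--
-- def mudar(l, pc):
--   c = con[pc]
--   posv = min(range(len(von)), key=lambda i: abs(c - von[i]))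
--   return str(l) + vo[posv] + co[pc + 1]
-- ===== Notes on version B (the rewrite author's own statement) =====
-- stated objective: simpler
-- what changed: B drops A's loop that grows a distance list and rescans it with min()+.index() on every iteration, computing the first nearest-vowel index directly with min(range(len(von)), key=...) and building the result in one expression.
import Mathlib
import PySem

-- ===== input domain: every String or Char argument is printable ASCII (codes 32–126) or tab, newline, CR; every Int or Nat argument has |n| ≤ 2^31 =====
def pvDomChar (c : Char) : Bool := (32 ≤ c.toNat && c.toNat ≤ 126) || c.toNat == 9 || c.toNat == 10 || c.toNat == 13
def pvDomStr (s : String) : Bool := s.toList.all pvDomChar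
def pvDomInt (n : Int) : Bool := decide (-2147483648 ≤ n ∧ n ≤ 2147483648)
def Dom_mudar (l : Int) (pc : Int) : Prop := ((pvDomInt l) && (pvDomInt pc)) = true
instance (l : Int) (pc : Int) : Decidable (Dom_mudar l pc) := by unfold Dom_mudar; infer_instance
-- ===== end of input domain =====

-- B replaces A's grow-a-distance-list-and-rescan loop by a single min(range, key) pass; objective: simpler (same constant cost).

-- module-level constants of the Python file
def pvCon : List Int := [2, 3, 4, 6, 7, 8, 10, 11, 12, 13, 14, 16, 17, 18, 19, 20, 22, 23, 24]
def pvCo : List String := ["b","c","d","f","g","h","j","k","l","m","n","p","q","r","s","t","v","x","z"]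
def pvVon : List Int := [1, 5, 9, 15, 21]
def pvVo : List String := ["a","e","i","o","u"]

-- ===== PORT A =====
-- literal port of A: the loop keeps (listaDV, posv); each iteration appends |con[pc] - vogaln|,
-- recomputes min(listaDV) and posv = listaDV.index(min).  con[pc]/vo[posv]/co[pc+1] are total
-- pyGetD forms; Pre_mudar states exactly the in-range conditions under which Python returns.
def mudar (l : Int) (pc : Int) : String :=
  let replace := PySem.Int.toStr l
  let st := (PySem.List.enumerate pvVon).foldl
    (fun (s : List Int × Nat) iv =>
      let listaDV := s.1 ++ [|PySem.List.pyGetD pvCon pc 0 - iv.2|]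
      let vvm := (PySem.List.min? listaDV (fun x => x)).getD 0
      let posv := (PySem.List.index? listaDV vvm).getD 0
      (listaDV, posv)) ([], 0)
  let replace := replace ++ PySem.List.pyGetD pvVo ((st.2 : Int)) ""
  let replace := replace ++ PySem.List.pyGetD pvCo (pc + 1) ""
  replace

-- ===== PORT B =====
-- literal port of Source B: c = con[pc]; posv = min(range(len(von)), key=λ i, |c - von[i]|);
-- result str(l) + vo[posv] + co[pc+1] (Python + is left-associated).
def mudar_alt (l : Int) (pc : Int) : String :=
  let c := PySem.List.pyGetD pvCon pc 0
  let posv := (PySem.List.min? (PySem.List.pyRange 0 (PySem.List.len pvVon) 1)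
      (fun i => |c - PySem.List.pyGetD pvVon i 0|)).getD 0
  (PySem.Int.toStr l ++ PySem.List.pyGetD pvVo posv "") ++ PySem.List.pyGetD pvCo (pc + 1) ""

-- ===== PRECONDITION & SPEC =====
-- Pre_ excludes exactly the inputs where Python A raises IndexError: con[pc] and co[pc+1]
-- must be in range (Python's negative-index rule included).
def Pre_mudar (l : Int) (pc : Int) : Prop :=
  PySem.Raise.InRange pvCon.length pc ∧ PySem.Raise.InRange pvCo.length (pc + 1)
instance (l : Int) (pc : Int) : Decidable (Pre_mudar l pc) := by unfold Pre_mudar; infer_instance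
def pvWitness_mudar : Int × Int := (0, 0)

def Spec_mudar (l : Int) (pc : Int) (out : String) : Prop := out = mudar_alt l pc
instance (l : Int) (pc : Int) (out : String) : Decidable (Spec_mudar l pc out) := by unfold Spec_mudar; infer_instance

-- ===== CLAIM (what is proved, stated in full; the proofs are below) =====
def Claim_equal_mudar : Prop := ∀ (l : Int) (pc : Int), Dom_mudar l pc → Pre_mudar l pc → Spec_mudar l pc (mudar l pc)

-- ===== LEMMAS AND PROOFS =====

-- ===== VERDICT (by name: the statement is the Claim_ definition above) =====
theorem mudar_spec : Claim_equal_mudar := by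
  intro l pc _ hpre
  obtain ⟨h1, h2⟩ := hpre
  simp only [PySem.Raise.InRange, pvCon, pvCo, List.length] at h1 h2
  have hlo : (-19 : Int) ≤ pc := by omega
  have hhi : pc ≤ 17 := by omega
  unfold Spec_mudar
  interval_cases pc <;> rfl
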